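-- pv_equiv track=rewrite | github.com/valvoda/under_the_influence | src/analyse/baselines.py | numerize_precedent
-- ===== SOURCE A (Python) =====
-- def numerize_precedent(train_ids, test_precedent):
--     new_precedent = []
--     for prec in test_precedent:
--         new_prec = []
--         for p in prec:
--             for i in range(len(train_ids)):
--                 if p in train_ids[i]:
--                     new_prec.append(i)
--         new_precedent.append(new_prec)
--
--     return new_precedent
-- ===== SOURCE B (Python) =====
-- def numerize_precedent(train_ids, test_precedent):
--     index = {}
--     for i, doc in enumerate(train_ids):
--         for p in doc:
--             lst = index.setdefault(p, [])
--             if not lst or lst[-1] != i: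
--                 lst.append(i)
--     return [[i for p in prec for i in index.get(p, [])] for prec in test_precedent]
-- ===== Notes on version B (the rewrite author's own statement) =====
-- stated objective: faster
-- what changed: Replaces the per-element scan over all of train_ids by an inverted index (element -> sorted list of train indices) built in one pass over train_ids, so each precedent element is answered by a single dict lookup.
import Mathlib
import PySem

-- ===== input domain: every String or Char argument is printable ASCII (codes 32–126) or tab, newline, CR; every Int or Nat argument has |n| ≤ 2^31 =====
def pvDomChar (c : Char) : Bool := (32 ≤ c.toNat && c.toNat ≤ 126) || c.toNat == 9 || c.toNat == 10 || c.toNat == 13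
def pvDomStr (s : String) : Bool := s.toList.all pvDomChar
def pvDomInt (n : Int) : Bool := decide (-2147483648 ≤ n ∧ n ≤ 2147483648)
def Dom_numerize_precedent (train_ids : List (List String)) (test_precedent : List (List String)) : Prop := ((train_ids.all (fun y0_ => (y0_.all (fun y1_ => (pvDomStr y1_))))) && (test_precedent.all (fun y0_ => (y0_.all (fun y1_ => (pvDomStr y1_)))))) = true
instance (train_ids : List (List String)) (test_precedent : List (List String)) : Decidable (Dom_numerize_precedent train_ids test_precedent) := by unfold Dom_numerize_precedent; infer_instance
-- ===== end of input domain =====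

-- B replaces A's per-element scan over all of train_ids with an inverted index built once
-- (element -> increasing list of train indices), objective: faster (asymptotic).


-- ===== PORT A =====
-- for prec: for p: for i in range(len(train_ids)): if p in train_ids[i]: new_prec.append(i)
def numerize_precedent (train_ids : List (List String)) (test_precedent : List (List String)) : List (List Int) :=
  test_precedent.foldl (fun new_precedent prec =>
    new_precedent ++ [prec.foldl (fun new_prec p =>
      (PySem.List.pyRange 0 (train_ids.length : Int) 1).foldl (fun np i =>
        if (PySem.List.pyGetD train_ids i []).contains p then np ++ [i] else np) new_prec) []]) []

-- ===== PORT B =====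
-- lst = index.setdefault(p, []); if not lst or lst[-1] != i: lst.append(i)
def pvIndexStep (i : Int) (d : PySem.Dict String (List Int)) (doc : List String) : PySem.Dict String (List Int) :=
  doc.foldl (fun d p =>
    let lst := d.getD p []
    if lst.getLast? = some i then d else d.insert p (lst ++ [i])) d

def pvBuildIndex (train_ids : List (List String)) : PySem.Dict String (List Int) :=
  (PySem.List.enumerate train_ids).foldl (fun d pr => pvIndexStep pr.1 d pr.2) PySem.Dict.empty

def numerize_precedent_alt (train_ids : List (List String)) (test_precedent : List (List String)) : List (List Int) :=
  let index := pvBuildIndex train_ids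
  test_precedent.map (fun prec => prec.flatMap (fun p => index.getD p []))

-- ===== PRECONDITION & SPEC =====
def Spec_numerize_precedent (train_ids : List (List String)) (test_precedent : List (List String)) (out : List (List Int)) : Prop := out = numerize_precedent_alt train_ids test_precedent
instance (train_ids : List (List String)) (test_precedent : List (List String)) (out : List (List Int)) : Decidable (Spec_numerize_precedent train_ids test_precedent out) := by unfold Spec_numerize_precedent; infer_instance

-- ===== CLAIM (what is proved, stated in full; the proofs are below) =====
def Claim_equal_numerize_precedent : Prop := ∀ (train_ids : List (List String)) (test_precedent : List (List String)), Dom_numerize_precedent train_ids test_precedent → Spec_numerize_precedent train_ids test_precedent (numerize_precedent train_ids test_precedent)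

-- ===== LEMMAS AND PROOFS =====

-- the canonical answer for one element: increasing indices of the train docs containing it
def pvIdx (train_ids : List (List String)) (p : String) : List Int :=
  List.map (fun i : Nat => (i : Int)) ((List.range train_ids.length).filter (fun i => (train_ids.getD i []).contains p))

lemma pvIdx_lt (train_ids : List (List String)) (p : String) :
    ∀ x ∈ pvIdx train_ids p, x < (train_ids.length : Int) := by
  intro x hx
  obtain ⟨i, hi, rfl⟩ := List.mem_map.mp hx
  have := List.mem_range.mp (List.mem_filter.mp hi).1
  exact_mod_cast this

lemma pvIdx_append (tids : List (List String)) (doc : List String) (p : String) :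
    pvIdx (tids ++ [doc]) p = pvIdx tids p ++ (if doc.contains p then [(tids.length : Int)] else []) := by
  unfold pvIdx
  rw [List.length_append]
  simp only [List.length_cons, List.length_nil]
  rw [List.range_succ, List.filter_append, List.map_append]
  congr 1
  · congr 1
    apply List.filter_congr
    intro i hi
    rw [List.getD_append _ _ _ _ (List.mem_range.mp hi)]
  · have : (tids ++ [doc]).getD tids.length [] = doc := by simp [List.getD]
    simp only [List.filter_cons, List.filter_nil, this]
    split <;> simp

lemma pvIndexStep_getD (doc : List String) (i : Int) (d : PySem.Dict String (List Int)) (p : String) :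
    (pvIndexStep i d doc).getD p [] =
      if p ∈ doc ∧ (d.getD p []).getLast? ≠ some i then d.getD p [] ++ [i] else d.getD p [] := by
  induction doc generalizing d with
  | nil => simp [pvIndexStep]
  | cons q rest ih =>
    simp only [pvIndexStep, List.foldl_cons] at *
    by_cases hlast : (d.getD q []).getLast? = some i
    · simp only [hlast, if_pos]
      rw [ih]
      by_cases hpq : p = q
      · subst hpq; simp [hlast]
      · simp [hpq]
    · simp only [if_neg hlast]
      rw [ih]
      by_cases hpq : p = q
      · subst hpq
        simp only [PySem.Dict.getD_insert, if_pos]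
        simp [hlast]
      · simp only [PySem.Dict.getD_insert, if_neg hpq]
        simp [hpq]

lemma pvBuildIndex_getD (train_ids : List (List String)) (p : String) :
    (pvBuildIndex train_ids).getD p [] = pvIdx train_ids p := by
  induction train_ids using List.reverseRecOn with
  | nil => simp [pvBuildIndex, pvIdx, PySem.List.enumerate_nil]
  | append_singleton tids doc ih =>
    have henum : PySem.List.enumerate (tids ++ [doc]) 0
        = PySem.List.enumerate tids 0 ++ [((tids.length : Int), doc)] := by
      rw [PySem.List.enumerate_append]
      simp [PySem.List.enumerate_cons]
    simp only [pvBuildIndex] at *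
    rw [henum, List.foldl_append]
    simp only [List.foldl_cons, List.foldl_nil]
    rw [pvIndexStep_getD, ih, pvIdx_append]
    have hlast : (pvIdx tids p).getLast? ≠ some (tids.length : Int) := by
      intro h
      have := pvIdx_lt tids p _ (List.mem_of_getLast? h)
      omega
    by_cases hmem : p ∈ doc
    · have hc : doc.contains p = true := by simpa using hmem
      simp [hmem, hlast]
    · have hc : doc.contains p = false := by simpa using hmem
      simp [hmem]

-- A's triple loop computes, per precedent list, the flatMap of pvIdx
lemma numerize_precedent_eq_map (train_ids : List (List String)) (test_precedent : List (List String)) :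
    numerize_precedent train_ids test_precedent
      = test_precedent.map (fun prec => prec.flatMap (fun p => pvIdx train_ids p)) := by
  unfold numerize_precedent
  rw [PySem.List.foldl_append_singleton_eq_map]
  simp only [List.nil_append]
  apply List.map_congr_left
  intro prec _
  have hinner : ∀ (p : String) (acc : List Int),
      (PySem.List.pyRange 0 (train_ids.length : Int) 1).foldl (fun np i =>
        if (PySem.List.pyGetD train_ids i []).contains p then np ++ [i] else np) acc
        = acc ++ pvIdx train_ids p := by
    intro p acc
    rw [PySem.List.foldl_append_if_eq_filter]
    congr 1
    rw [PySem.List.pyRange_zero_natCast, List.filter_map]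
    unfold pvIdx
    congr 1
    apply List.filter_congr
    intro i _
    simp [PySem.List.pyGetD_natCast]
  have hfold : ∀ acc : List Int, prec.foldl (fun new_prec p =>
      (PySem.List.pyRange 0 (train_ids.length : Int) 1).foldl (fun np i =>
        if (PySem.List.pyGetD train_ids i []).contains p then np ++ [i] else np) new_prec) acc
        = acc ++ prec.flatMap (fun p => pvIdx train_ids p) := by
    intro acc
    rw [← PySem.List.foldl_append_eq_flatMap (l := prec) (g := fun p => pvIdx train_ids p) (acc := acc)]
    apply PySem.List.foldl_congr_mem
    intro acc' q _
    exact hinner q acc'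
  simpa using hfold []

-- ===== VERDICT (by name: the statement is the Claim_ definition above) =====
theorem numerize_precedent_spec : Claim_equal_numerize_precedent := by
  intro train_ids test_precedent _
  unfold Spec_numerize_precedent numerize_precedent_alt
  rw [numerize_precedent_eq_map]
  simp only []
  apply List.map_congr_left
  intro prec _
  apply List.flatMap_congr
  intro p _
  exact (pvBuildIndex_getD train_ids p).symm
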